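-- pv_equiv track=rewrite | github.com/markodjukanovic90/VGLCS | src/dp_algorithm_1_improved.py | vglcs_incremental_max
-- ===== SOURCE A (Python) =====
-- from collections import deque
--
-- def vglcs_incremental_max(A, B, G_A, G_B):
--     n, m = len(A), len(B)
--
--     F = [[0] * (m + 1) for _ in range(n + 1)]
--     V = [[0] * (m + 1) for _ in range(n + 1)]
--
--     # Monotonic queues for each column (1-based indexing)
--     column_max = [deque() for _ in range(m + 1)]
--
--     for i in range(1, n + 1):
--         g_a = G_A[i - 1]
--
--         # Update column-wise monotonic queues based on previous row
--         for j in range(1, m + 1):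
--             # Remove outdated rows from the front of the deque
--             while column_max[j] and column_max[j][0][0] <= i - g_a - 1:
--                 column_max[j].popleft()
--
--             # Insert F[i-1][j] into the deque, maintaining monotonicity
--             if i > 1:
--                 current_val = F[i - 1][j]
--                 while column_max[j] and column_max[j][-1][1] <= current_val:
--                     column_max[j].pop()
--                 column_max[j].append((i - 1, current_val))
--
--         for j in range(1, m + 1):
--             g_b = G_B[j - 1]
--
--             # Compute the maximum value in the rectangle using column_max
--             max_val = 0
--             for y in range(max(1, j - g_b), j):
--                 if column_max[y]:
--                     max_val = max(max_val, column_max[y][0][1])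
--
--             if A[i - 1] == B[j - 1]:
--                 F[i][j] = 1 + max_val
--             else:
--                 F[i][j] = 0
--
--             V[i][j] = max(F[i][j], V[i - 1][j], V[i][j - 1])
--
--     return V[n][m], V, F
-- ===== SOURCE B (Python) =====
-- def vglcs_incremental_max(A, B, G_A, G_B):
--     n, m = len(A), len(B)
--     F = [[0] * (m + 1) for _ in range(n + 1)]
--     V = [[0] * (m + 1) for _ in range(n + 1)]
--
--     # Single list of still-live previous-row indices, shared by all columns.
--     rows = []
--
--     for i in range(1, n + 1):
--         g_a = G_A[i - 1]
--         rows = [r for r in rows if r > i - g_a - 1]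
--         if i > 1:
--             rows.append(i - 1)
--
--         # Per-column maximum of F over the live rows (None when no live row).
--         if rows:
--             colmax = [max(F[r][y] for r in rows) for y in range(m + 1)]
--         else:
--             colmax = None
--
--         for j in range(1, m + 1):
--             g_b = G_B[j - 1]
--             max_val = 0
--             if colmax is not None:
--                 for y in range(max(1, j - g_b), j):
--                     if colmax[y] > max_val:
--                         max_val = colmax[y]
--             F[i][j] = 1 + max_val if A[i - 1] == B[j - 1] else 0
--             V[i][j] = max(F[i][j], V[i - 1][j], V[i][j - 1])
--
--     return V[n][m], V, F
-- ===== Notes on version B (the rewrite author's own statement) =====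
-- stated objective: simpler
-- what changed: B drops the per-column monotonic deques entirely: it keeps one shared list of live previous-row indices (filter + append per row) and computes each column's maximum over those rows directly, so no deque invariants or per-column pop/push bookkeeping remain.
import Mathlib
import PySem

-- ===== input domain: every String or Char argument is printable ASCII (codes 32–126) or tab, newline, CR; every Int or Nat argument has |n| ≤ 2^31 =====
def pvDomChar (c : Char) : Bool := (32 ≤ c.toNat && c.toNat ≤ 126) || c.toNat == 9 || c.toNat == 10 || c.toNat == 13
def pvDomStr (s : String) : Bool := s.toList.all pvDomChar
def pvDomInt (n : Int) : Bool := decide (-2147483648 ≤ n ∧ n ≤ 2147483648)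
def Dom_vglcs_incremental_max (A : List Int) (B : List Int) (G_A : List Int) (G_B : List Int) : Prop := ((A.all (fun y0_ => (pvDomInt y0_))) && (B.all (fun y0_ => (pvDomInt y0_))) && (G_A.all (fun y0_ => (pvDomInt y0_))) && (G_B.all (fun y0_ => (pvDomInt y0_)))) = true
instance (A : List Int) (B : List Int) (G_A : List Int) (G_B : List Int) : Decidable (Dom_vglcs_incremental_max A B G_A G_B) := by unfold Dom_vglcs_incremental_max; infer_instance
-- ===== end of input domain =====

-- B replaces A's per-column monotonic deques by one shared list of live row
-- indices plus a per-row column-maximum pass: shorter and plainer (objective: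
-- simpler); the return value is proved identical on all inputs where A returns.

-- shared table plumbing: t[i][j] reads and writes on a list-of-lists
def pvGet2 (t : List (List Int)) (i j : Nat) : Int := (t.getD i []).getD j 0
def pvSet2 (t : List (List Int)) (i j : Nat) (v : Int) : List (List Int) :=
  t.set i ((t.getD i []).set j v)
def pvZeros (n m : Nat) : List (List Int) := List.replicate n (List.replicate m 0)

-- ===== PORT A =====
-- `while column_max[j] and column_max[j][0][0] <= i - g_a - 1: popleft()`
def popExpired (b : Int) : List (Nat × Int) → List (Nat × Int)
  | [] => []
  | p :: q => if (p.1 : Int) ≤ b then popExpired b q else p :: q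

-- `while column_max[j] and column_max[j][-1][1] <= v: pop()` then `append((r, v))`
-- (deque as a list, front at head; result has length 1 exactly when all were popped)
def pushMono (r : Nat) (v : Int) : List (Nat × Int) → List (Nat × Int)
  | [] => [(r, v)]
  | a :: q =>
    let s := pushMono r v q
    if s.length = 1 ∧ a.2 ≤ v then s else a :: s

-- body of A's first inner loop for one column j
def updateQ (i : Nat) (ga : Int) (F : List (List Int)) (j : Nat)
    (q : List (Nat × Int)) : List (Nat × Int) :=
  let q1 := popExpired ((i : Int) - ga - 1) q
  if 1 < i then pushMono (i - 1) (pvGet2 F (i - 1) j) q1 else q1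

-- `for y in range(max(1, j - g_b), j): if column_max[y]: max_val = max(max_val, column_max[y][0][1])`
def maxWinA (colqs : List (List (Nat × Int))) (gb : Int) (j : Nat) : Int :=
  (PySem.List.pyRange (max 1 ((j : Int) - gb)) (j : Int) 1).foldl
    (fun mv y =>
      match colqs.getD y.toNat [] with
      | [] => mv
      | p :: _ => max mv p.2) 0

-- body of A's second inner loop (one j), state = (F, V)
def innerA (A B G_B : List Int) (i : Nat) (colqs : List (List (Nat × Int)))
    (fv : List (List Int) × List (List Int)) (k2 : Nat) :
    List (List Int) × List (List Int) :=
  let j := k2 + 1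
  let gb := G_B.getD (j - 1) 0
  let mv := maxWinA colqs gb j
  let fij := if A.getD (i - 1) 0 = B.getD (j - 1) 0 then 1 + mv else 0
  (pvSet2 fv.1 i j fij,
   pvSet2 fv.2 i j (max (max fij (pvGet2 fv.2 (i - 1) j)) (pvGet2 fv.2 i (j - 1))))

-- body of A's outer loop (one i = k + 1), state = (F, V, column_max);
-- the j-loop mutating column_max[j] in place (j = 1..m, index 0 untouched) is the per-index map
def stepA (A B G_A G_B : List Int) (m : Nat)
    (st : List (List Int) × List (List Int) × List (List (Nat × Int))) (k : Nat) :
    List (List Int) × List (List Int) × List (List (Nat × Int)) :=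
  let i := k + 1
  let ga := G_A.getD (i - 1) 0
  let colqs := st.2.2.mapIdx (fun j q => if j = 0 then q else updateQ i ga st.1 j q)
  let FV := (List.range m).foldl (innerA A B G_B i colqs) (st.1, st.2.1)
  (FV.1, FV.2, colqs)

def vglcs_incremental_max (A : List Int) (B : List Int) (G_A : List Int) (G_B : List Int) :
    Int × List (List Int) × List (List Int) :=
  let n := A.length
  let m := B.length
  let st := (List.range n).foldl (stepA A B G_A G_B m)
    (pvZeros (n + 1) (m + 1), pvZeros (n + 1) (m + 1),
     List.replicate (m + 1) ([] : List (Nat × Int)))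
  (pvGet2 st.2.1 n m, st.2.1, st.1)

-- ===== PORT B =====
-- Python max of a nonempty list/generator (Source B only applies it to nonempty ones)
def listMax1 : List Int → Int
  | [] => 0
  | a :: l => l.foldl max a

-- `for y in range(max(1, j - g_b), j): if colmax[y] > max_val: max_val = colmax[y]`
def maxWinB (cm : List Int) (gb : Int) (j : Nat) : Int :=
  (PySem.List.pyRange (max 1 ((j : Int) - gb)) (j : Int) 1).foldl
    (fun mv y => if mv < cm.getD y.toNat 0 then cm.getD y.toNat 0 else mv) 0

-- body of B's inner j-loop, state = (F, V)
def innerB (A B G_B : List Int) (i : Nat) (colmax : Option (List Int))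
    (fv : List (List Int) × List (List Int)) (k2 : Nat) :
    List (List Int) × List (List Int) :=
  let j := k2 + 1
  let gb := G_B.getD (j - 1) 0
  let mv := match colmax with
    | none => 0
    | some cm => maxWinB cm gb j
  let fij := if A.getD (i - 1) 0 = B.getD (j - 1) 0 then 1 + mv else 0
  (pvSet2 fv.1 i j fij,
   pvSet2 fv.2 i j (max (max fij (pvGet2 fv.2 (i - 1) j)) (pvGet2 fv.2 i (j - 1))))

-- body of B's outer loop (one i = k + 1), state = (F, V, rows)
def stepB (A B G_A G_B : List Int) (m : Nat)
    (st : List (List Int) × List (List Int) × List Nat) (k : Nat) :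
    List (List Int) × List (List Int) × List Nat :=
  let i := k + 1
  let ga := G_A.getD (i - 1) 0
  let rows0 := st.2.2.filter (fun (r : Nat) => decide ((i : Int) - ga - 1 < (r : Int)))
  let rows := if 1 < i then rows0 ++ [i - 1] else rows0
  let colmax : Option (List Int) :=
    if rows.isEmpty then none
    else some ((List.range (m + 1)).map
      (fun y => listMax1 (rows.map (fun r => pvGet2 st.1 r y))))
  let FV := (List.range m).foldl (innerB A B G_B i colmax) (st.1, st.2.1)
  (FV.1, FV.2, rows)

def vglcs_incremental_max_alt (A : List Int) (B : List Int) (G_A : List Int) (G_B : List Int) :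
    Int × List (List Int) × List (List Int) :=
  let n := A.length
  let m := B.length
  let st := (List.range n).foldl (stepB A B G_A G_B m)
    (pvZeros (n + 1) (m + 1), pvZeros (n + 1) (m + 1), ([] : List Nat))
  (pvGet2 st.2.1 n m, st.2.1, st.1)

-- ===== PRECONDITION & SPEC =====
-- Pre_ excludes exactly the inputs where Python A raises IndexError:
-- G_A shorter than A (read for every i when A ≠ []), or G_B shorter than B (read when A ≠ [] and B ≠ []).
def Pre_vglcs_incremental_max (A : List Int) (B : List Int) (G_A : List Int) (G_B : List Int) : Prop :=
  A = [] ∨ (A.length ≤ G_A.length ∧ (B = [] ∨ B.length ≤ G_B.length))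
instance (A : List Int) (B : List Int) (G_A : List Int) (G_B : List Int) : Decidable (Pre_vglcs_incremental_max A B G_A G_B) := by unfold Pre_vglcs_incremental_max; infer_instance

def pvWitness_vglcs_incremental_max : List Int × List Int × List Int × List Int :=
  ([1, 2], [2, 1], [1, 2], [2, 1])

def Spec_vglcs_incremental_max (A : List Int) (B : List Int) (G_A : List Int) (G_B : List Int) (out : Int × List (List Int) × List (List Int)) : Prop := out = vglcs_incremental_max_alt A B G_A G_B
instance (A : List Int) (B : List Int) (G_A : List Int) (G_B : List Int) (out : Int × List (List Int) × List (List Int)) : Decidable (Spec_vglcs_incremental_max A B G_A G_B out) := by unfold Spec_vglcs_incremental_max; infer_instance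

-- ===== CLAIM (what is proved, stated in full; the proofs are below) =====
def Claim_equal_vglcs_incremental_max : Prop := ∀ (A : List Int) (B : List Int) (G_A : List Int) (G_B : List Int), Dom_vglcs_incremental_max A B G_A G_B → Pre_vglcs_incremental_max A B G_A G_B → Spec_vglcs_incremental_max A B G_A G_B (vglcs_incremental_max A B G_A G_B)

-- ===== LEMMAS AND PROOFS =====

-- the "right-dominant skeleton": what a monotonic deque holds after inserting a
-- column's (row, value) pairs in row order — an entry survives iff its value is
-- strictly greater than every later value
def skel : List (Nat × Int) → List (Nat × Int)
  | [] => []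
  | a :: l =>
    match skel l with
    | [] => [a]
    | b :: s => if b.2 < a.2 then a :: b :: s else b :: s

-- the deque contents expected for column j given table F and live rows
def pairsC (F : List (List Int)) (rows : List Nat) (j : Nat) : List (Nat × Int) :=
  rows.map (fun r => (r, pvGet2 F r j))

def mkQs (m : Nat) (F : List (List Int)) (rows : List Nat) : List (List (Nat × Int)) :=
  (List.range (m + 1)).map (fun j => if j = 0 then [] else skel (pairsC F rows j))

lemma skel_cons_eq (a : Nat × Int) (l : List (Nat × Int)) :
    skel (a :: l) = match skel l with
      | [] => [a]
      | b :: s => if b.2 < a.2 then a :: b :: s else b :: s := rfl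

lemma pushMono_cons_eq (r : Nat) (v : Int) (a : Nat × Int) (q : List (Nat × Int)) :
    pushMono r v (a :: q) =
      if (pushMono r v q).length = 1 ∧ a.2 ≤ v then pushMono r v q
      else a :: pushMono r v q := rfl

lemma pushMono_ne_nil (r : Nat) (v : Int) (q : List (Nat × Int)) : pushMono r v q ≠ [] := by
  induction q with
  | nil => simp [pushMono]
  | cons a q ih =>
    simp only [pushMono]
    split
    · exact ih
    · simp

lemma pushMono_len1 (r : Nat) (v : Int) (q : List (Nat × Int))
    (h : (pushMono r v q).length = 1) : pushMono r v q = [(r, v)] := by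
  induction q with
  | nil => rfl
  | cons a q ih =>
    rw [pushMono_cons_eq] at h ⊢
    split at h
    · rename_i hc
      rw [if_pos hc]
      exact ih h
    · exfalso
      simp only [List.length_cons] at h
      have hne := pushMono_ne_nil r v q
      cases hq : pushMono r v q with
      | nil => exact hne hq
      | cons x xs => rw [hq] at h; simp at h

lemma pushMono_skel (r : Nat) (v : Int) (l : List (Nat × Int)) :
    pushMono r v (skel l) = skel (l ++ [(r, v)]) := by
  induction l with
  | nil => rfl
  | cons a l ih =>
    cases h : skel l with
    | nil =>
      have hr' : skel (l ++ [(r, v)]) = [(r, v)] := by rw [← ih, h]; rfl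
      simp only [List.cons_append, skel_cons_eq, h, hr']
      rw [pushMono_cons_eq]
      by_cases hav : a.2 ≤ v
      · rw [if_pos ⟨rfl, hav⟩, if_neg (not_lt.mpr hav)]
        rfl
      · rw [if_neg (fun hc => hav hc.2), if_pos (not_le.mp hav)]
        rfl
    | cons b s =>
      have hr' : skel (l ++ [(r, v)]) = pushMono r v (b :: s) := by rw [← ih, h]
      simp only [List.cons_append, skel_cons_eq, h, hr']
      by_cases hP : (pushMono r v (b :: s)).length = 1
      · have hPv : pushMono r v (b :: s) = [(r, v)] := pushMono_len1 _ _ _ hP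
        have hbv : b.2 ≤ v := by
          by_contra hbv
          rw [pushMono_cons_eq, if_neg (fun hc => hbv hc.2)] at hPv
          have := pushMono_ne_nil r v s
          simp only [List.cons.injEq] at hPv
          exact this hPv.2
        by_cases hba : b.2 < a.2
        · rw [if_pos hba, pushMono_cons_eq, hPv]
          by_cases hav : a.2 ≤ v
          · rw [if_pos ⟨rfl, hav⟩]
            simp [not_lt.mpr hav]
          · rw [if_neg (fun hc => hav hc.2)]
            simp [not_le.mp hav]
        · rw [if_neg hba, hPv]
          have hva : ¬ v < a.2 := not_lt.mpr (le_trans (not_lt.mp hba) hbv)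
          simp [hva]
      · have hPb : pushMono r v (b :: s) = b :: pushMono r v s := by
          rw [pushMono_cons_eq, if_neg]
          intro hc
          apply hP
          rw [pushMono_cons_eq, if_pos hc]
          exact hc.1
        by_cases hba : b.2 < a.2
        · rw [if_pos hba, pushMono_cons_eq, if_neg (fun hc => hP hc.1), hPb]
          simp [hba]
        · rw [if_neg hba, hPb]
          simp [hba]

lemma skel_sublist (l : List (Nat × Int)) : List.Sublist (skel l) l := by
  induction l with
  | nil => simp [skel]
  | cons a l ih =>
    cases h : skel l with
    | nil =>
      simp only [skel_cons_eq, h]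
      exact (List.nil_sublist l).cons₂ a
    | cons b s =>
      simp only [skel_cons_eq, h]
      rw [h] at ih
      by_cases hba : b.2 < a.2
      · rw [if_pos hba]; exact ih.cons₂ a
      · rw [if_neg hba]; exact ih.cons a

lemma popExpired_skel (b : Int) (l : List (Nat × Int))
    (h : l.Pairwise (fun p q => p.1 < q.1)) :
    popExpired b (skel l) = skel (l.filter (fun p => decide (b < (p.1 : Int)))) := by
  induction l with
  | nil => rfl
  | cons a l ih =>
    have hpw := List.pairwise_cons.mp h
    by_cases hab : b < (a.1 : Int)
    · have hall : ∀ x ∈ a :: l, b < (x.1 : Int) := by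
        intro x hx
        rcases List.mem_cons.mp hx with hx | hx
        · rw [hx]; exact hab
        · have := hpw.1 x hx
          have : (a.1 : Int) < (x.1 : Int) := by exact_mod_cast this
          omega
      have hfilter : (a :: l).filter (fun p => decide (b < (p.1 : Int))) = a :: l :=
        List.filter_eq_self.mpr (fun x hx => by simpa using hall x hx)
      rw [hfilter]
      cases hs : skel (a :: l) with
      | nil => rfl
      | cons p t =>
        have hp : p ∈ a :: l := (skel_sublist (a :: l)).subset (by rw [hs]; exact List.mem_cons_self)
        have hnp : ¬ ((p.1 : Int) ≤ b) := not_le.mpr (hall p hp)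
        simp [popExpired, hnp]
    · have hfilter : (a :: l).filter (fun p => decide (b < (p.1 : Int)))
          = l.filter (fun p => decide (b < (p.1 : Int))) := by
        simp [hab]
      rw [hfilter, ← ih hpw.2]
      have hexp : (a.1 : Int) ≤ b := not_lt.mp hab
      cases hs : skel l with
      | nil =>
        simp only [skel_cons_eq, hs]
        simp [popExpired, hexp]
      | cons p t =>
        simp only [skel_cons_eq, hs]
        by_cases hpa : p.2 < a.2
        · rw [if_pos hpa]
          simp [popExpired, hexp]
        · rw [if_neg hpa]

lemma foldl_max_max (L : List Int) (x y : Int) :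
    L.foldl max (max x y) = max x (L.foldl max y) := by
  induction L generalizing y with
  | nil => simp
  | cons c L ih =>
    simp only [List.foldl_cons]
    rw [max_assoc, ih]

lemma skel_cons (a : Nat × Int) (l : List (Nat × Int)) :
    ∃ p s, skel (a :: l) = p :: s ∧ p.2 = (l.map Prod.snd).foldl max a.2 := by
  induction l generalizing a with
  | nil => exact ⟨a, [], by simp [skel], by simp⟩
  | cons c l ih =>
    obtain ⟨p, s, hps, hval⟩ := ih c
    simp only [skel_cons_eq, hps]
    by_cases h : p.2 < a.2
    · refine ⟨a, p :: s, by rw [if_pos h], ?_⟩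
      simp only [List.map_cons, List.foldl_cons]
      rw [foldl_max_max, ← hval]
      exact (max_eq_left h.le).symm
    · refine ⟨p, s, by rw [if_neg h], ?_⟩
      simp only [List.map_cons, List.foldl_cons]
      rw [foldl_max_max, ← hval]
      exact (max_eq_right (not_lt.mp h)).symm

lemma foldl_id {α β : Type} (l : List β) (init : α) :
    l.foldl (fun a _ => a) init = init := by
  induction l <;> simp_all

lemma mapIdx_map_range {α β : Type} (f : Nat → α → β) (g : Nat → α) (N : Nat) :
    ((List.range N).map g).mapIdx f = (List.range N).map (fun j => f j (g j)) := by
  apply List.ext_getElem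
  · simp
  · intro i h1 h2
    simp [List.getElem_mapIdx]

lemma pvGet2_set2_ne (t : List (List Int)) (i j : Nat) (v : Int) (r y : Nat) (hr : r ≠ i) :
    pvGet2 (pvSet2 t i j v) r y = pvGet2 t r y := by
  simp [pvGet2, pvSet2, List.getD_eq_getElem?_getD, List.getElem?_set_ne (fun h => hr h.symm)]

lemma pairsC_pairwise (F : List (List Int)) (rows : List Nat) (j : Nat)
    (hs : rows.Pairwise (· < ·)) : (pairsC F rows j).Pairwise (fun p q => p.1 < q.1) := by
  simpa [pairsC, List.pairwise_map] using hs

lemma updateQ_skel (i : Nat) (ga : Int) (F : List (List Int)) (j : Nat) (rows : List Nat)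
    (hs : rows.Pairwise (· < ·)) :
    updateQ i ga F j (skel (pairsC F rows j)) =
      skel (pairsC F
        (if 1 < i then
          rows.filter (fun (r : Nat) => decide ((i : Int) - ga - 1 < (r : Int))) ++ [i - 1]
         else rows.filter (fun (r : Nat) => decide ((i : Int) - ga - 1 < (r : Int)))) j) := by
  have hpop : popExpired ((i : Int) - ga - 1) (skel (pairsC F rows j))
      = skel (pairsC F (rows.filter (fun (r : Nat) => decide ((i : Int) - ga - 1 < (r : Int)))) j) := by
    rw [popExpired_skel _ _ (pairsC_pairwise F rows j hs)]
    congr 1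
    simp [pairsC, List.filter_map, Function.comp_def]
  unfold updateQ
  rw [hpop]
  by_cases hi : 1 < i
  · rw [if_pos hi, if_pos hi, pushMono_skel]
    congr 1
    simp [pairsC]
  · rw [if_neg hi, if_neg hi]

lemma getD_mkQs (m : Nat) (F : List (List Int)) (rows : List Nat) (y : Nat) (hy : y < m + 1) :
    (mkQs m F rows).getD y [] = if y = 0 then [] else skel (pairsC F rows y) := by
  simp [mkQs, List.getD_eq_getElem?_getD, hy]

lemma maxWinA_nil (m : Nat) (F : List (List Int)) (gb : Int) (j : Nat) (hjm : j ≤ m) :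
    maxWinA (mkQs m F []) gb j = 0 := by
  unfold maxWinA
  rw [PySem.List.foldl_congr_mem (g := fun mv _ => mv), foldl_id]
  intro acc y hy
  have hmem := PySem.List.mem_pyRange_one.mp hy
  have h1 : (1 : Int) ≤ y := le_trans (le_max_left 1 _) hmem.1
  have hyn : y.toNat < m + 1 := by omega
  rw [getD_mkQs m F [] y.toNat hyn, if_neg (by omega : ¬ y.toNat = 0)]
  rfl

lemma maxWinA_cons (m : Nat) (F : List (List Int)) (gb : Int) (j : Nat) (r0 : Nat)
    (rs : List Nat) (hjm : j ≤ m) :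
    maxWinA (mkQs m F (r0 :: rs)) gb j
      = maxWinB ((List.range (m + 1)).map
          (fun y => listMax1 ((r0 :: rs).map (fun r => pvGet2 F r y)))) gb j := by
  unfold maxWinA maxWinB
  apply PySem.List.foldl_congr_mem
  intro acc y hy
  have hmem := PySem.List.mem_pyRange_one.mp hy
  have h1 : (1 : Int) ≤ y := le_trans (le_max_left 1 _) hmem.1
  have hyn : y.toNat < m + 1 := by omega
  have hcm : ((List.range (m + 1)).map
      (fun y => listMax1 ((r0 :: rs).map (fun r => pvGet2 F r y)))).getD y.toNat 0
      = listMax1 ((r0 :: rs).map (fun r => pvGet2 F r y.toNat)) := by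
    simp [List.getD_eq_getElem?_getD, hyn]
  obtain ⟨p, s, hps, hval⟩ := skel_cons (r0, pvGet2 F r0 y.toNat) (pairsC F rs y.toNat)
  have hpv : p.2 = listMax1 ((r0 :: rs).map (fun r => pvGet2 F r y.toNat)) := by
    rw [hval]
    simp [pairsC, listMax1, List.map_map, Function.comp_def]
  have hA : (mkQs m F (r0 :: rs)).getD y.toNat []
      = p :: s := by
    rw [getD_mkQs _ _ _ _ hyn, if_neg (by omega : ¬ y.toNat = 0)]
    have : pairsC F (r0 :: rs) y.toNat
        = (r0, pvGet2 F r0 y.toNat) :: pairsC F rs y.toNat := rfl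
    rw [this, hps]
  rw [hA, hcm, ← hpv]
  by_cases hc : acc < p.2
  · rw [if_pos hc]
    exact max_eq_right hc.le
  · rw [if_neg hc]
    exact max_eq_left (not_lt.mp hc)

lemma innerAB_eq (A B G_B : List Int) (m i : Nat) (F : List (List Int)) (rows : List Nat)
    (fv : List (List Int) × List (List Int)) :
    (List.range m).foldl (innerA A B G_B i (mkQs m F rows)) fv
      = (List.range m).foldl (innerB A B G_B i (if rows.isEmpty then none
          else some ((List.range (m + 1)).map
            (fun y => listMax1 (rows.map (fun r => pvGet2 F r y)))))) fv := by
  apply PySem.List.foldl_congr_mem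
  intro acc k2 hk2
  have hk : k2 + 1 ≤ m := List.mem_range.mp hk2
  cases rows with
  | nil =>
    unfold innerA innerB
    dsimp only
    rw [maxWinA_nil m F _ (k2 + 1) hk]
    simp
  | cons r0 rs =>
    unfold innerA innerB
    dsimp only
    rw [maxWinA_cons m F _ (k2 + 1) r0 rs hk]
    simp

lemma fold_F_stable (A B G_B : List Int) (i : Nat) (cm : Option (List Int)) (l : List Nat)
    (fv : List (List Int) × List (List Int)) (r y : Nat) (hr : r ≠ i) :
    pvGet2 ((l.foldl (innerB A B G_B i cm) fv).1) r y = pvGet2 fv.1 r y := by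
  induction l generalizing fv with
  | nil => rfl
  | cons a l ih =>
    rw [List.foldl_cons, ih]
    exact pvGet2_set2_ne _ _ _ _ _ _ hr

lemma mkQs_nil (m : Nat) (F : List (List Int)) :
    mkQs m F [] = List.replicate (m + 1) ([] : List (Nat × Int)) := by
  apply List.ext_getElem
  · simp [mkQs]
  · intro i h1 h2
    simp [mkQs, pairsC, skel, ite_self]

lemma step_rel (A B G_A G_B : List Int) (m k : Nat) (F V : List (List Int))
    (rows : List Nat) (hs : rows.Pairwise (· < ·)) (hb : ∀ r ∈ rows, 1 ≤ r ∧ r < k) :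
    stepA A B G_A G_B m (F, V, mkQs m F rows) k
      = ((stepB A B G_A G_B m (F, V, rows) k).1,
         (stepB A B G_A G_B m (F, V, rows) k).2.1,
         mkQs m (stepB A B G_A G_B m (F, V, rows) k).1
           (stepB A B G_A G_B m (F, V, rows) k).2.2)
    ∧ (stepB A B G_A G_B m (F, V, rows) k).2.2.Pairwise (· < ·)
    ∧ ∀ r ∈ (stepB A B G_A G_B m (F, V, rows) k).2.2, 1 ≤ r ∧ r < k + 1 := by
  -- the new live-row list produced by stepB
  set ga := G_A.getD (k + 1 - 1) 0 with hga_def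
  set rows' := (if 1 < k + 1 then
      rows.filter (fun (r : Nat) => decide (((k + 1 : Nat) : Int) - ga - 1 < (r : Int))) ++ [k + 1 - 1]
    else rows.filter (fun (r : Nat) => decide (((k + 1 : Nat) : Int) - ga - 1 < (r : Int)))) with hrows'
  have hrows'_bounds : ∀ r ∈ rows', 1 ≤ r ∧ r < k + 1 := by
    intro r hr
    rw [hrows'] at hr
    by_cases h1k : 1 < k + 1
    · rw [if_pos h1k] at hr
      rcases List.mem_append.mp hr with hr | hr
      · have := hb r (List.mem_of_mem_filter hr)
        omega
      · simp at hr
        omega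
    · rw [if_neg h1k] at hr
      have := hb r (List.mem_of_mem_filter hr)
      omega
  have hrows'_lt : ∀ r ∈ rows', r ≠ k + 1 := by
    intro r hr
    rw [hrows'] at hr
    by_cases h1k : 1 < k + 1
    · rw [if_pos h1k] at hr
      rcases List.mem_append.mp hr with hr | hr
      · have := hb r (List.mem_of_mem_filter hr)
        omega
      · simp at hr
        omega
    · rw [if_neg h1k] at hr
      have := hb r (List.mem_of_mem_filter hr)
      omega
  have hrows'_pw : rows'.Pairwise (· < ·) := by
    rw [hrows']
    by_cases h1k : 1 < k + 1
    · rw [if_pos h1k]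
      apply List.pairwise_append.mpr
      refine ⟨hs.filter _, List.pairwise_singleton _ _, ?_⟩
      intro a ha b hbb
      simp at hbb
      have := hb a (List.mem_of_mem_filter ha)
      omega
    · rw [if_neg h1k]
      exact hs.filter _
  have hq : (mkQs m F rows).mapIdx
      (fun j q => if j = 0 then q else updateQ (k + 1) ga F j q) = mkQs m F rows' := by
    rw [mkQs, mapIdx_map_range, mkQs]
    apply List.map_congr_left
    intro j hj
    by_cases hj0 : j = 0
    · simp [hj0]
    · rw [if_neg hj0, if_neg hj0, if_neg hj0, updateQ_skel _ _ _ _ _ hs, hrows']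
  simp only [stepA, stepB, ← hga_def, ← hrows', hq]
  rw [innerAB_eq A B G_B m (k + 1) F rows']
  refine ⟨?_, hrows'_pw, hrows'_bounds⟩
  congr 1
  congr 1
  -- remaining: mkQs m F rows' = mkQs m (fold result).1 rows'
  rw [mkQs, mkQs]
  apply List.map_congr_left
  intro j hj
  by_cases hj0 : j = 0
  · simp [hj0]
  · rw [if_neg hj0, if_neg hj0]
    congr 1
    rw [pairsC, pairsC]
    apply List.map_congr_left
    intro r hr
    rw [fold_F_stable A B G_B (k + 1) _ _ _ r j (hrows'_lt r hr)]

lemma fold_rel (A B G_A G_B : List Int) (m : Nat) (F0 V0 : List (List Int)) (N : Nat) :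
    (List.range N).foldl (stepA A B G_A G_B m)
        (F0, V0, List.replicate (m + 1) ([] : List (Nat × Int)))
      = (((List.range N).foldl (stepB A B G_A G_B m) (F0, V0, ([] : List Nat))).1,
         ((List.range N).foldl (stepB A B G_A G_B m) (F0, V0, [])).2.1,
         mkQs m ((List.range N).foldl (stepB A B G_A G_B m) (F0, V0, [])).1
           ((List.range N).foldl (stepB A B G_A G_B m) (F0, V0, [])).2.2)
    ∧ ((List.range N).foldl (stepB A B G_A G_B m) (F0, V0, [])).2.2.Pairwise (· < ·)
    ∧ ∀ r ∈ ((List.range N).foldl (stepB A B G_A G_B m) (F0, V0, [])).2.2,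
        1 ≤ r ∧ r < N := by
  induction N with
  | zero =>
    refine ⟨?_, List.Pairwise.nil, by simp⟩
    simp [mkQs_nil]
  | succ N ih =>
    obtain ⟨h1, h2, h3⟩ := ih
    rw [List.range_succ, List.foldl_append, List.foldl_append]
    simp only [List.foldl_cons, List.foldl_nil]
    rw [h1]
    have hstep := step_rel A B G_A G_B m N
      ((List.range N).foldl (stepB A B G_A G_B m) (F0, V0, [])).1
      ((List.range N).foldl (stepB A B G_A G_B m) (F0, V0, [])).2.1
      ((List.range N).foldl (stepB A B G_A G_B m) (F0, V0, [])).2.2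
      h2 h3
    exact ⟨hstep.1, hstep.2.1, hstep.2.2⟩

theorem vglcs_incremental_max_spec : Claim_equal_vglcs_incremental_max := by
  intro A B G_A G_B _ _
  unfold Spec_vglcs_incremental_max
  unfold vglcs_incremental_max vglcs_incremental_max_alt
  simp only []
  rw [(fold_rel A B G_A G_B B.length (pvZeros (A.length + 1) (B.length + 1))
    (pvZeros (A.length + 1) (B.length + 1)) A.length).1]
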